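-- pv_equiv track=rewrite | github.com/KengineeredKhaos/vcdb_v2 | tests/slices/calendar/test_calendar_finance_bridge.py | _derive_restriction_type
-- ===== SOURCE A (Python) =====
-- def _derive_restriction_type(
--     restriction_keys: tuple[str, ...],
--     archetype: str,
-- ) -> str:
--     keys = {str(k).strip().lower() for k in restriction_keys}
--     arch = (archetype or "").strip().lower()
--
--     if {"perm", "permanent", "permanently_restricted"} & keys or arch in {
--         "perm",
--         "permanent",
--         "permanently_restricted",
--     }:
--         return "permanently_restricted"
--     if {"temp", "temporary", "temporarily_restricted"} & keys or arch in {
--         "temp",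
--         "temporary",
--         "temporarily_restricted",
--     }:
--         return "temporarily_restricted"
--     return "unrestricted"
-- ===== SOURCE B (Python) =====
-- _RANK = {
--     "perm": 0, "permanent": 0, "permanently_restricted": 0,
--     "temp": 1, "temporary": 1, "temporarily_restricted": 1,
-- }
-- _NAMES = ("permanently_restricted", "temporarily_restricted", "unrestricted")
--
--
-- def _derive_restriction_type(restriction_keys, archetype):
--     best = 2
--     for token in list(restriction_keys) + [archetype or ""]:
--         best = min(best, _RANK.get(str(token).strip().lower(), 2))
--     return _NAMES[best]
-- ===== Notes on version B (the rewrite author's own statement) =====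
-- stated objective: simpler
-- what changed: Replaces the two set-intersection/membership branch checks with a single table-driven pass: each normalized token (keys plus archetype) is mapped to a priority rank via one dict and a running minimum selects the result.
import Mathlib
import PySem

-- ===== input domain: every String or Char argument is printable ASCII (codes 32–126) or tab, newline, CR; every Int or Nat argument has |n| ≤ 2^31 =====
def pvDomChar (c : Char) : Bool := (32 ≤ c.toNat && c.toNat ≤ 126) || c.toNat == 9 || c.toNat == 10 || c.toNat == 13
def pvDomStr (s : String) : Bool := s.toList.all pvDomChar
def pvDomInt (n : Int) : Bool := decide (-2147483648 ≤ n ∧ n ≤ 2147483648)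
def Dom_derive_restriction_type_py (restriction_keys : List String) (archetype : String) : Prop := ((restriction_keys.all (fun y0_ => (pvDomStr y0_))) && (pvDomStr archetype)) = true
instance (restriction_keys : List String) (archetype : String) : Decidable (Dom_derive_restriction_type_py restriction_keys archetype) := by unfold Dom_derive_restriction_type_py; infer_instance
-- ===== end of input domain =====

-- ===== PORT A =====
-- B is a simpler table-driven rewrite: one rank dict and a running-minimum pass instead of two set-intersection branches.
def derive_restriction_type_py (restriction_keys : List String) (archetype : String) : String :=
  let keys : PySem.Set String :=
    PySem.Set.ofList (restriction_keys.map (fun k => PySem.Str.lower (PySem.Str.strip k)))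
  let arch := PySem.Str.lower (PySem.Str.strip (if archetype = "" then "" else archetype))
  if PySem.Set.inter (PySem.Set.ofList ["perm", "permanent", "permanently_restricted"]) keys ≠ [] ∨
      arch ∈ (["perm", "permanent", "permanently_restricted"] : List String) then
    "permanently_restricted"
  else if PySem.Set.inter (PySem.Set.ofList ["temp", "temporary", "temporarily_restricted"]) keys ≠ [] ∨
      arch ∈ (["temp", "temporary", "temporarily_restricted"] : List String) then
    "temporarily_restricted"
  else
    "unrestricted"

-- ===== PORT B =====
def pvRankDict : PySem.Dict String Int :=
  PySem.Dict.ofList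
    [("perm", 0), ("permanent", 0), ("permanently_restricted", 0),
     ("temp", 1), ("temporary", 1), ("temporarily_restricted", 1)]

def pvNames : List String := ["permanently_restricted", "temporarily_restricted", "unrestricted"]

def derive_restriction_type_py_alt (restriction_keys : List String) (archetype : String) : String :=
  let best :=
    (restriction_keys ++ [if archetype = "" then "" else archetype]).foldl
      (fun b token => min b (PySem.Dict.getD pvRankDict (PySem.Str.lower (PySem.Str.strip token)) 2)) 2
  PySem.List.pyGetD pvNames best "unrestricted"

-- ===== PRECONDITION & SPEC =====
def Spec_derive_restriction_type_py (restriction_keys : List String) (archetype : String) (out : String) : Prop := out = derive_restriction_type_py_alt restriction_keys archetype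
instance (restriction_keys : List String) (archetype : String) (out : String) : Decidable (Spec_derive_restriction_type_py restriction_keys archetype out) := by unfold Spec_derive_restriction_type_py; infer_instance

-- ===== CLAIM =====
def Claim_equal_derive_restriction_type_py : Prop := ∀ (restriction_keys : List String) (archetype : String), Dom_derive_restriction_type_py restriction_keys archetype → Spec_derive_restriction_type_py restriction_keys archetype (derive_restriction_type_py restriction_keys archetype)

-- ===== LEMMAS AND PROOFS =====

-- the rank of one normalized token, and the minimum rank of a list of tokens
def pvRank (t : String) : Int := PySem.Dict.getD pvRankDict t 2

def pvNorm (t : String) : String := PySem.Str.lower (PySem.Str.strip t)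

def pvListMin (L : List String) : Int := L.foldr (fun t b => min (pvRank (pvNorm t)) b) 2

theorem pvRank_cases (t : String) : pvRank t = 0 ∨ pvRank t = 1 ∨ pvRank t = 2 := by
  unfold pvRank pvRankDict
  simp only [PySem.Dict.ofList, PySem.Dict.update, List.foldl, PySem.Dict.getD_insert,
    PySem.Dict.getD_empty]
  split_ifs <;> simp

theorem pvRank_eq_zero_iff (t : String) :
    pvRank t = 0 ↔ t ∈ (["perm", "permanent", "permanently_restricted"] : List String) := by
  unfold pvRank pvRankDict
  simp only [PySem.Dict.ofList, PySem.Dict.update, List.foldl, PySem.Dict.getD_insert,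
    PySem.Dict.getD_empty]
  split_ifs with h1 h2 h3 h4 h5 h6 <;> simp_all

theorem pvRank_eq_one_iff (t : String) :
    pvRank t = 1 ↔ t ∈ (["temp", "temporary", "temporarily_restricted"] : List String) := by
  unfold pvRank pvRankDict
  simp only [PySem.Dict.ofList, PySem.Dict.update, List.foldl, PySem.Dict.getD_insert,
    PySem.Dict.getD_empty]
  split_ifs with h1 h2 h3 h4 h5 h6 <;> simp_all

theorem pv_foldl_eq_min_listMin (L : List String) (a : Int) (ha : a ≤ 2) :
    L.foldl (fun b token => min b (pvRank (pvNorm token))) a = min a (pvListMin L) := by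
  induction L generalizing a with
  | nil => simp only [List.foldl_nil, pvListMin, List.foldr_nil]; omega
  | cons x L ih =>
    have hx := pvRank_cases (pvNorm x)
    rw [List.foldl_cons, ih _ (by omega)]
    simp only [pvListMin, List.foldr_cons]
    omega

theorem pvListMin_bounds (L : List String) : 0 ≤ pvListMin L ∧ pvListMin L ≤ 2 := by
  induction L with
  | nil => simp [pvListMin]
  | cons x L ih =>
    have := pvRank_cases (pvNorm x)
    simp only [pvListMin, List.foldr_cons] at *
    omega

theorem pvListMin_le_iff (L : List String) (k : Int) (hk : k < 2) :
    pvListMin L ≤ k ↔ ∃ t ∈ L, pvRank (pvNorm t) ≤ k := by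
  induction L with
  | nil => simp [pvListMin]; omega
  | cons x L ih =>
    simp only [pvListMin, List.foldr_cons] at *
    rw [min_le_iff, ih]
    simp [List.mem_cons, exists_eq_or_imp]

theorem pvListMin_eq_zero_iff (L : List String) :
    pvListMin L = 0 ↔ ∃ t ∈ L, pvRank (pvNorm t) = 0 := by
  have hb := pvListMin_bounds L
  constructor
  · intro h
    obtain ⟨t, ht, hle⟩ := (pvListMin_le_iff L 0 (by omega)).mp (by omega)
    exact ⟨t, ht, by have := pvRank_cases (pvNorm t); omega⟩
  · rintro ⟨t, ht, h0⟩
    have := (pvListMin_le_iff L 0 (by omega)).mpr ⟨t, ht, by omega⟩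
    omega

theorem pvListMin_eq_one_iff (L : List String)
    (h0 : ¬∃ t ∈ L, pvRank (pvNorm t) = 0) :
    pvListMin L = 1 ↔ ∃ t ∈ L, pvRank (pvNorm t) = 1 := by
  have hb := pvListMin_bounds L
  have hne : pvListMin L ≠ 0 := fun h => h0 ((pvListMin_eq_zero_iff L).mp h)
  constructor
  · intro h
    obtain ⟨t, ht, hle⟩ := (pvListMin_le_iff L 1 (by omega)).mp (by omega)
    rcases pvRank_cases (pvNorm t) with hr | hr | hr
    · exact absurd ⟨t, ht, hr⟩ h0
    · exact ⟨t, ht, hr⟩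
    · omega
  · rintro ⟨t, ht, h1⟩
    have := (pvListMin_le_iff L 1 (by omega)).mpr ⟨t, ht, by omega⟩
    omega

theorem pv_interP_iff (restriction_keys : List String) (P : List String) :
    PySem.Set.inter (PySem.Set.ofList P)
        (PySem.Set.ofList (restriction_keys.map (fun k => PySem.Str.lower (PySem.Str.strip k)))) ≠ [] ↔
      ∃ k ∈ restriction_keys, pvNorm k ∈ P := by
  constructor
  · intro h
    obtain ⟨y, hy⟩ := List.exists_mem_of_ne_nil _ h
    rw [PySem.Set.mem_inter, PySem.Set.mem_ofList, PySem.Set.mem_ofList, List.mem_map] at hy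
    obtain ⟨hy1, k, hk, hkeq⟩ := hy
    exact ⟨k, hk, by rw [pvNorm, hkeq]; exact hy1⟩
  · rintro ⟨k, hk, hmem⟩ hnil
    have : pvNorm k ∈ PySem.Set.inter (PySem.Set.ofList P)
        (PySem.Set.ofList (restriction_keys.map (fun x => PySem.Str.lower (PySem.Str.strip x)))) := by
      rw [PySem.Set.mem_inter, PySem.Set.mem_ofList, PySem.Set.mem_ofList]
      exact ⟨hmem, List.mem_map.mpr ⟨k, hk, rfl⟩⟩
    simp [hnil] at this

theorem derive_restriction_type_py_eq (restriction_keys : List String) (archetype : String) :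
    derive_restriction_type_py restriction_keys archetype =
      derive_restriction_type_py_alt restriction_keys archetype := by
  have harch : (if archetype = "" then "" else archetype) = archetype := by
    split <;> simp_all
  unfold derive_restriction_type_py derive_restriction_type_py_alt
  rw [harch]
  rw [show (fun b token => min b (PySem.Dict.getD pvRankDict (PySem.Str.lower (PySem.Str.strip token)) 2)) = (fun b token => min b (pvRank (pvNorm token))) from rfl]
  rw [pv_foldl_eq_min_listMin _ _ (by omega)]
  set L := restriction_keys ++ [archetype] with hL
  have hb := pvListMin_bounds L
  have hmin2 : min 2 (pvListMin L) = pvListMin L := by omega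
  rw [hmin2]
  have hLsplit : ∀ (r : Int), (∃ t ∈ L, pvRank (pvNorm t) = r) ↔
      ((∃ k ∈ restriction_keys, pvRank (pvNorm k) = r) ∨ pvRank (pvNorm archetype) = r) := by
    intro r
    simp [hL, List.mem_append, or_and_right, exists_or]
  by_cases h0 : ∃ t ∈ L, pvRank (pvNorm t) = 0
  · have hm : pvListMin L = 0 := (pvListMin_eq_zero_iff L).mpr h0
    have hcond : PySem.Set.inter (PySem.Set.ofList ["perm", "permanent", "permanently_restricted"])
        (PySem.Set.ofList (restriction_keys.map (fun k => PySem.Str.lower (PySem.Str.strip k)))) ≠ [] ∨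
        PySem.Str.lower (PySem.Str.strip archetype) ∈
          (["perm", "permanent", "permanently_restricted"] : List String) := by
      rcases (hLsplit 0).mp h0 with ⟨k, hk, hr⟩ | hr
      · exact Or.inl ((pv_interP_iff _ _).mpr ⟨k, hk, (pvRank_eq_zero_iff _).mp hr⟩)
      · exact Or.inr ((pvRank_eq_zero_iff _).mp hr)
    rw [if_pos hcond, hm]
    decide
  · have hcond0 : ¬(PySem.Set.inter (PySem.Set.ofList ["perm", "permanent", "permanently_restricted"])
        (PySem.Set.ofList (restriction_keys.map (fun k => PySem.Str.lower (PySem.Str.strip k)))) ≠ [] ∨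
        PySem.Str.lower (PySem.Str.strip archetype) ∈
          (["perm", "permanent", "permanently_restricted"] : List String)) := by
      rintro (h | h)
      · obtain ⟨k, hk, hmem⟩ := (pv_interP_iff _ _).mp h
        exact h0 ((hLsplit 0).mpr (Or.inl ⟨k, hk, (pvRank_eq_zero_iff _).mpr hmem⟩))
      · exact h0 ((hLsplit 0).mpr (Or.inr ((pvRank_eq_zero_iff _).mpr h)))
    rw [if_neg hcond0]
    by_cases h1 : ∃ t ∈ L, pvRank (pvNorm t) = 1
    · have hm : pvListMin L = 1 := (pvListMin_eq_one_iff L h0).mpr h1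
      have hcond : PySem.Set.inter (PySem.Set.ofList ["temp", "temporary", "temporarily_restricted"])
          (PySem.Set.ofList (restriction_keys.map (fun k => PySem.Str.lower (PySem.Str.strip k)))) ≠ [] ∨
          PySem.Str.lower (PySem.Str.strip archetype) ∈
            (["temp", "temporary", "temporarily_restricted"] : List String) := by
        rcases (hLsplit 1).mp h1 with ⟨k, hk, hr⟩ | hr
        · exact Or.inl ((pv_interP_iff _ _).mpr ⟨k, hk, (pvRank_eq_one_iff _).mp hr⟩)
        · exact Or.inr ((pvRank_eq_one_iff _).mp hr)
      rw [if_pos hcond, hm]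
      decide
    · have hcond1 : ¬(PySem.Set.inter (PySem.Set.ofList ["temp", "temporary", "temporarily_restricted"])
          (PySem.Set.ofList (restriction_keys.map (fun k => PySem.Str.lower (PySem.Str.strip k)))) ≠ [] ∨
          PySem.Str.lower (PySem.Str.strip archetype) ∈
            (["temp", "temporary", "temporarily_restricted"] : List String)) := by
        rintro (h | h)
        · obtain ⟨k, hk, hmem⟩ := (pv_interP_iff _ _).mp h
          exact h1 ((hLsplit 1).mpr (Or.inl ⟨k, hk, (pvRank_eq_one_iff _).mpr hmem⟩))
        · exact h1 ((hLsplit 1).mpr (Or.inr ((pvRank_eq_one_iff _).mpr h)))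
      rw [if_neg hcond1]
      have hm : pvListMin L = 2 := by
        have hn0 : pvListMin L ≠ 0 := fun h => h0 ((pvListMin_eq_zero_iff L).mp h)
        have hn1 : pvListMin L ≠ 1 := fun h => h1 ((pvListMin_eq_one_iff L h0).mp h)
        omega
      rw [hm]
      decide

-- ===== VERDICT =====
theorem derive_restriction_type_py_spec : Claim_equal_derive_restriction_type_py := by
  intro ks arch _
  unfold Spec_derive_restriction_type_py
  exact derive_restriction_type_py_eq ks arch
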